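-- pv_equiv track=rewrite | github.com/robakof/Auto-ERP-Agent | tools/agent_bus_cli.py | _parse_suggest_block
-- ===== SOURCE A (Python) =====
-- _SUGGEST_TYPES = ("rule", "tool", "discovery", "observation")
--
-- def _parse_suggest_block(block: str) -> tuple[str, str, str]:
--     """Parse a suggestion block into (type, title, content).
--
--     Metadata lines at the top of the block: 'type: <value>' and 'title: <value>'.
--     Remaining lines (after stripping leading metadata) become the content.
--     """
--     lines = block.splitlines()
--     suggest_type = "observation"
--     title = ""
--     content_start = 0
--     for i, line in enumerate(lines):
--         lower = line.strip().lower()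
--         if lower.startswith("type:"):
--             value = line.split(":", 1)[1].strip()
--             if value in _SUGGEST_TYPES:
--                 suggest_type = value
--             content_start = i + 1
--         elif lower.startswith("title:"):
--             title = line.split(":", 1)[1].strip()
--             content_start = i + 1
--         else:
--             break
--     content = "\n".join(lines[content_start:]).strip()
--     return suggest_type, title, content
-- ===== SOURCE B (Python) =====
-- _SUGGEST_TYPES = ("rule", "tool", "discovery", "observation")
--
--
-- def _is_meta(line):
--     low = line.strip().lower()
--     return low.startswith("type:") or low.startswith("title:")
--
--
-- def _value(line):
--     return line.split(":", 1)[1].strip()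
--
--
-- def _parse_suggest_block(block):
--     """Find the header/body boundary, then take each field as the LAST matching
--     header line via a reverse search (instead of a forward loop with overwriting
--     state)."""
--     lines = block.splitlines()
--     n = next((i for i, l in enumerate(lines) if not _is_meta(l)), len(lines))
--     header = lines[:n]
--     suggest_type = next(
--         (_value(l) for l in reversed(header)
--          if l.strip().lower().startswith("type:") and _value(l) in _SUGGEST_TYPES),
--         "observation")
--     title = next(
--         (_value(l) for l in reversed(header)
--          if l.strip().lower().startswith("title:")),
--         "")
--     return suggest_type, title, "\n".join(lines[n:]).strip()
-- ===== Notes on version B (the rewrite author's own statement) =====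
-- stated objective: alternative
-- what changed: Replaces A's forward state loop (which overwrites type/title and tracks content_start as it goes) by boundary-then-reverse-search: locate the first non-metadata line, then obtain each field as the last matching header line via a generator search over reversed(header).
import Mathlib
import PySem

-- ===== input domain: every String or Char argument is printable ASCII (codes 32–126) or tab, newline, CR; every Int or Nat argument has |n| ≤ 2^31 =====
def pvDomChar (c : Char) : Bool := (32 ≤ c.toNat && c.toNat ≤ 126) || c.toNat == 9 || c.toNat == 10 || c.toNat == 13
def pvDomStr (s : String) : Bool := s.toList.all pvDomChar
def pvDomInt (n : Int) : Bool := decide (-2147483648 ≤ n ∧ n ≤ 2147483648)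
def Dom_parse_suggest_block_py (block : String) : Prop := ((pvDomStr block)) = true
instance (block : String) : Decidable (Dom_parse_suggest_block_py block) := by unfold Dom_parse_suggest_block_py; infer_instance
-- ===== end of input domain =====

-- B replaces A's forward state loop by boundary-then-reverse-search: find the first
-- non-metadata line, then pick each field as the LAST matching header line; objective: alternative.

-- ===== PORT A =====
def pvSuggestTypes : List String := ["rule", "tool", "discovery", "observation"]

-- line.split(":", 1)[1].strip()  (only evaluated on lines that contain ':')
def pvSplitVal (line : String) : String :=
  PySem.Str.strip (PySem.List.pyGetD ((PySem.Str.splitMax? line ":" 1).getD []) 1 "")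

-- A's 'for i, line in enumerate(lines)' with break, state (suggest_type, title, content_start)
def pvALoop : List String → Nat → String → String → Nat → String × String × Nat
  | [], _, st, ti, cs => (st, ti, cs)
  | line :: rest, i, st, ti, cs =>
    let lower := PySem.Str.lower (PySem.Str.strip line)
    if PySem.Str.startswith lower "type:" then
      let value := pvSplitVal line
      if value ∈ pvSuggestTypes then pvALoop rest (i + 1) value ti (i + 1)
      else pvALoop rest (i + 1) st ti (i + 1)
    else if PySem.Str.startswith lower "title:" then
      pvALoop rest (i + 1) st (pvSplitVal line) (i + 1)
    else (st, ti, cs)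

def parse_suggest_block_py (block : String) : String × String × String :=
  let lines := PySem.Str.splitlines block
  let r := pvALoop lines 0 "observation" "" 0
  (r.1, r.2.1, PySem.Str.strip (PySem.Str.join "\n" (PySem.List.slice lines (some (r.2.2 : Int)) none)))

-- ===== PORT B =====
def pvIsMeta (line : String) : Bool :=
  let low := PySem.Str.lower (PySem.Str.strip line)
  PySem.Str.startswith low "type:" || PySem.Str.startswith low "title:"

-- next((i for i, l in enumerate(lines) if not _is_meta(l)), len(lines))
def pvBoundary : List String → Nat
  | [] => 0
  | l :: rest => if pvIsMeta l then pvBoundary rest + 1 else 0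

-- next((_value(l) for l in rev if type-line with valid value), default via .getD)
def pvFindType : List String → Option String
  | [] => none
  | l :: rest =>
    if PySem.Str.startswith (PySem.Str.lower (PySem.Str.strip l)) "type:"
        && decide (pvSplitVal l ∈ pvSuggestTypes) then some (pvSplitVal l)
    else pvFindType rest

-- next((_value(l) for l in rev if title-line), default via .getD)
def pvFindTitle : List String → Option String
  | [] => none
  | l :: rest =>
    if PySem.Str.startswith (PySem.Str.lower (PySem.Str.strip l)) "title:" then some (pvSplitVal l)
    else pvFindTitle rest

def parse_suggest_block_py_alt (block : String) : String × String × String :=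
  let lines := PySem.Str.splitlines block
  let n := pvBoundary lines
  let header := lines.take n
  ((pvFindType header.reverse).getD "observation",
   (pvFindTitle header.reverse).getD "",
   PySem.Str.strip (PySem.Str.join "\n" (lines.drop n)))

-- ===== PRECONDITION & SPEC =====
def Spec_parse_suggest_block_py (block : String) (out : String × String × String) : Prop := out = parse_suggest_block_py_alt block
instance (block : String) (out : String × String × String) : Decidable (Spec_parse_suggest_block_py block out) := by unfold Spec_parse_suggest_block_py; infer_instance

-- ===== CLAIM (what is proved, stated in full; the proofs are below) =====
def Claim_equal_parse_suggest_block_py : Prop := ∀ (block : String), Dom_parse_suggest_block_py block → Spec_parse_suggest_block_py block (parse_suggest_block_py block)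

-- ===== LEMMAS AND PROOFS =====
theorem pvFindType_append (xs ys : List String) :
    pvFindType (xs ++ ys) = (pvFindType xs).or (pvFindType ys) := by
  induction xs with
  | nil => simp [pvFindType]
  | cons l rest ih =>
    simp only [List.cons_append, pvFindType, ih]
    split <;> simp [Option.or]

theorem pvFindTitle_append (xs ys : List String) :
    pvFindTitle (xs ++ ys) = (pvFindTitle xs).or (pvFindTitle ys) := by
  induction xs with
  | nil => simp [pvFindTitle]
  | cons l rest ih =>
    simp only [List.cons_append, pvFindTitle, ih]
    split <;> simp [Option.or]

-- a line whose stripped, lowered form starts with "type:" cannot also start with "title:"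
theorem pvType_not_title (l : List Char)
    (h : PySem.Chars.startswith l ['t','y','p','e',':'] = true) :
    PySem.Chars.startswith l ['t','i','t','l','e',':'] = false := by
  rw [PySem.Chars.startswith_iff] at h
  by_contra hc
  rw [Bool.not_eq_false, PySem.Chars.startswith_iff] at hc
  obtain ⟨a, ha⟩ := h
  obtain ⟨b, hb⟩ := hc
  have := ha.trans hb.symm
  simp at this

-- A's loop, entered with cs = i, equals B's boundary-plus-reverse-searches, shifted by i.
theorem pvALoop_eq (lines : List String) : ∀ (i : Nat) (st ti : String),
    pvALoop lines i st ti i =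
      ((pvFindType (lines.take (pvBoundary lines)).reverse).getD st,
       (pvFindTitle (lines.take (pvBoundary lines)).reverse).getD ti,
       i + pvBoundary lines) := by
  induction lines with
  | nil => intro i st ti; simp [pvALoop, pvBoundary, pvFindType, pvFindTitle]
  | cons line rest ih =>
    intro i st ti
    by_cases hty : PySem.Chars.startswith (PySem.Chars.lower (PySem.Chars.strip line.toList)) ['t','y','p','e',':'] = true
    · have hnt := pvType_not_title _ hty
      have hm : pvIsMeta line = true := by simp [pvIsMeta, hty]
      have hb : pvBoundary (line :: rest) = pvBoundary rest + 1 := by simp [pvBoundary, hm]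
      by_cases hv : pvSplitVal line ∈ pvSuggestTypes
      · rw [show pvALoop (line :: rest) i st ti i = pvALoop rest (i+1) (pvSplitVal line) ti (i+1) from by
          simp [pvALoop, hty, hv]]
        rw [ih, hb]
        simp only [List.take_succ_cons, List.reverse_cons, pvFindType_append, pvFindTitle_append,
          pvFindType, pvFindTitle, hv]
        cases pvFindType (List.take (pvBoundary rest) rest).reverse <;>
          cases pvFindTitle (List.take (pvBoundary rest) rest).reverse <;>
            simp [Option.or, hty, hnt] <;> omega
      · rw [show pvALoop (line :: rest) i st ti i = pvALoop rest (i+1) st ti (i+1) from by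
          simp [pvALoop, hty, hv]]
        rw [ih, hb]
        simp only [List.take_succ_cons, List.reverse_cons, pvFindType_append, pvFindTitle_append,
          pvFindType, pvFindTitle, hv]
        cases pvFindType (List.take (pvBoundary rest) rest).reverse <;>
          cases pvFindTitle (List.take (pvBoundary rest) rest).reverse <;>
            simp [Option.or, hty, hnt] <;> omega
    · by_cases hti : PySem.Chars.startswith (PySem.Chars.lower (PySem.Chars.strip line.toList)) ['t','i','t','l','e',':'] = true
      · have hm : pvIsMeta line = true := by simp [pvIsMeta, hti]
        have hb : pvBoundary (line :: rest) = pvBoundary rest + 1 := by simp [pvBoundary, hm]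
        rw [show pvALoop (line :: rest) i st ti i = pvALoop rest (i+1) st (pvSplitVal line) (i+1) from by
          simp [pvALoop, hty, hti]]
        rw [ih, hb]
        simp only [List.take_succ_cons, List.reverse_cons, pvFindType_append, pvFindTitle_append,
          pvFindType, pvFindTitle]
        cases pvFindType (List.take (pvBoundary rest) rest).reverse <;>
          cases pvFindTitle (List.take (pvBoundary rest) rest).reverse <;>
            simp [Option.or, hty, hti] <;> omega
      · have hm : pvIsMeta line = false := by simp [pvIsMeta, hty, hti]
        simp [pvALoop, hty, hti, pvBoundary, hm, pvFindType, pvFindTitle]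

-- ===== VERDICT (by name: the statement is the Claim_ definition above) =====
theorem parse_suggest_block_py_spec : Claim_equal_parse_suggest_block_py := by
  intro block _
  unfold Spec_parse_suggest_block_py parse_suggest_block_py parse_suggest_block_py_alt
  simp only [pvALoop_eq, Nat.zero_add]
  rw [PySem.List.slice_from_natCast]
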